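-- pv_equiv track=rewrite | github.com/xode114kr1/algorithm-study | 프로그래머스/1/388351. 유연근무제/유연근무제.py | solution
-- ===== SOURCE A (Python) =====
-- def solution(schedules, timelogs, startday):
--
--     def timeToNum(time):
--         h, m = time // 100, time % 100
--         return 60 * h + m
--
--     n = len(schedules)
--     ans = 0
--
--     for idx in range(n):
--         day = startday
--         start_time = timeToNum(schedules[idx])
--         isClear = True
--         for i in range(7):
--             if day % 7 == 6 or day % 7 == 0: # 토 / 일이면 스킵
--                 day += 1
--                 continue
--             if start_time + 10 < timeToNum(timelogs[idx][i]):
--                 isClear = False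
--             day += 1
--         if isClear : ans += 1
--
--     return ans
-- ===== SOURCE B (Python) =====
-- def solution(schedules, timelogs, startday):
--     # Day-major sweep: instead of checking each employee's whole week, walk the 7
--     # days once and filter out, day by day, the employees who clocked in late.
--     def timeToNum(time):
--         return 60 * (time // 100) + time % 100
--
--     limits = [timeToNum(s) + 10 for s in schedules]
--     alive = list(range(len(schedules)))
--     for i in range(7):
--         if (startday + i) % 7 in (0, 6):
--             continue
--         alive = [j for j in alive if timeToNum(timelogs[j][i]) <= limits[j]]
--     return len(alive)
-- ===== Notes on version B (the rewrite author's own statement) =====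
-- stated objective: alternative
-- what changed: Transposes the traversal: instead of A's employee-major scan with a day counter and an isClear flag, B sweeps the 7 days once and maintains a shrinking survivor list of employee indices, filtering out late employees day by day; the answer is the number of survivors.
import Mathlib
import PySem

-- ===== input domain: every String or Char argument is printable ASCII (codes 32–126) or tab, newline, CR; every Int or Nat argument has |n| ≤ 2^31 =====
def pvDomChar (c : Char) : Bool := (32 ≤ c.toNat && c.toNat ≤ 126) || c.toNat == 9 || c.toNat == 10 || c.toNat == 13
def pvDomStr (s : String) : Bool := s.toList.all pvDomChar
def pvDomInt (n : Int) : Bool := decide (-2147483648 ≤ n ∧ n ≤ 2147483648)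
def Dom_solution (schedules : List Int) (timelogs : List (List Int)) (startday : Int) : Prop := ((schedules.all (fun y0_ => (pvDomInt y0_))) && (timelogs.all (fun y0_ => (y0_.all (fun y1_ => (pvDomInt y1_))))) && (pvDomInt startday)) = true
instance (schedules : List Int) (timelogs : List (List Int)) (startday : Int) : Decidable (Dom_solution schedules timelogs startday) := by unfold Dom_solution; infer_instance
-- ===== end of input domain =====

-- B transposes A's traversal: a single sweep over the 7 days maintaining a shrinking
-- survivor list of employee indices, instead of A's per-employee day-counter/flag loop.

-- ===== PORT A =====
def timeToNum (time : Int) : Int :=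
  60 * PySem.Int.floordiv time 100 + PySem.Int.mod time 100

def solution (schedules : List Int) (timelogs : List (List Int)) (startday : Int) : Int :=
  let n : Int := schedules.length
  (PySem.List.pyRange 0 n 1).foldl (fun ans idx =>
    let start_time := timeToNum (PySem.List.pyGetD schedules idx 0)
    let st := (PySem.List.pyRange 0 7 1).foldl (fun (st : Int × Bool) i =>
      (st.1 + 1,
        if PySem.Int.mod st.1 7 = 6 ∨ PySem.Int.mod st.1 7 = 0 then st.2
        else if start_time + 10 < timeToNum (PySem.List.pyGetD (PySem.List.pyGetD timelogs idx []) i 0) then false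
        else st.2)) (startday, true)
    if st.2 then ans + 1 else ans) 0

-- ===== PORT B =====
def solution_alt (schedules : List Int) (timelogs : List (List Int)) (startday : Int) : Int :=
  let limits := schedules.map (fun s => timeToNum s + 10)
  let alive0 := PySem.List.pyRange 0 (schedules.length : Int) 1
  let alive := (PySem.List.pyRange 0 7 1).foldl (fun alive i =>
    if PySem.Int.mod (startday + i) 7 = 0 ∨ PySem.Int.mod (startday + i) 7 = 6 then alive
    else alive.filter (fun j =>
      timeToNum (PySem.List.pyGetD (PySem.List.pyGetD timelogs j []) i 0)
        ≤ PySem.List.pyGetD limits j 0)) alive0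
  (alive.length : Int)

-- ===== PRECONDITION & SPEC =====
-- Pre_ excludes exactly the inputs where Python A raises IndexError: timelogs shorter than
-- schedules, or a used row too short for some working-day offset i (day startday+i not a weekend).
def Pre_solution (schedules : List Int) (timelogs : List (List Int)) (startday : Int) : Prop :=
  schedules.length ≤ timelogs.length ∧
  ∀ row ∈ timelogs.take schedules.length,
    ∀ i ∈ ([0,1,2,3,4,5,6] : List Int),
      (PySem.Int.mod (startday + i) 7 = 0 ∨ PySem.Int.mod (startday + i) 7 = 6) ∨ i < (row.length : Int)
instance (schedules : List Int) (timelogs : List (List Int)) (startday : Int) : Decidable (Pre_solution schedules timelogs startday) := by unfold Pre_solution; infer_instance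

def pvWitness_solution : List Int × List (List Int) × Int :=
  ([900, 1000], [[905, 900, 910, 900, 900, 900, 900], [1100, 1000, 1000, 1000, 1000, 1000, 1000]], 3)

def Spec_solution (schedules : List Int) (timelogs : List (List Int)) (startday : Int) (out : Int) : Prop := out = solution_alt schedules timelogs startday
instance (schedules : List Int) (timelogs : List (List Int)) (startday : Int) (out : Int) : Decidable (Spec_solution schedules timelogs startday out) := by unfold Spec_solution; infer_instance

-- ===== CLAIM (what is proved, stated in full; the proofs are below) =====
def Claim_equal_solution : Prop := ∀ (schedules : List Int) (timelogs : List (List Int)) (startday : Int), Dom_solution schedules timelogs startday → Pre_solution schedules timelogs startday → Spec_solution schedules timelogs startday (solution schedules timelogs startday)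

-- ===== LEMMAS AND PROOFS =====
theorem tn7 : PySem.List.pyRange 0 7 1 = [0,1,2,3,4,5,6] := by decide

-- A's inner 7-day loop, with the day counter made explicit
def loop2 (ts : Int) (row : List Int) : List Int → Int → Bool
  | [], _ => true
  | i :: t, d =>
    ((decide (PySem.Int.mod d 7 = 6 ∨ PySem.Int.mod d 7 = 0)) ||
      !decide (ts + 10 < timeToNum (PySem.List.pyGetD row i 0))) && loop2 ts row t (d + 1)

theorem fold_inv (ts : Int) (row : List Int) : ∀ (L : List Int) (d : Int) (b : Bool),
    (L.foldl (fun (st : Int × Bool) i =>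
      (st.1 + 1,
        if PySem.Int.mod st.1 7 = 6 ∨ PySem.Int.mod st.1 7 = 0 then st.2
        else if ts + 10 < timeToNum (PySem.List.pyGetD row i 0) then false
        else st.2)) (d, b)).2 = (b && loop2 ts row L d) := by
  intro L
  induction L with
  | nil => intro d b; simp [loop2]
  | cons i t ih =>
    intro d b
    simp only [List.foldl_cons, loop2]
    rw [ih]
    by_cases hW : PySem.Int.mod d 7 = 6 ∨ PySem.Int.mod d 7 = 0 <;>
      by_cases hl : ts + 10 < timeToNum (PySem.List.pyGetD row i 0) <;>
        simp [hl, Bool.and_comm, Bool.and_left_comm]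

theorem atom_eq (x a b : Int) :
    ((decide (PySem.Int.mod x 7 = 6 ∨ PySem.Int.mod x 7 = 0)) || !decide (a + 10 < b))
      = ((!decide ¬(PySem.Int.mod x 7 = 0 ∨ PySem.Int.mod x 7 = 6)) || decide (b ≤ a + 10)) := by
  by_cases hab : a + 10 < b
  · have hba : ¬ b ≤ a + 10 := by omega
    simp [hab, hba, or_comm]
  · have hba : b ≤ a + 10 := by omega
    simp [hab, hba, or_comm]

-- A's per-employee verdict, as an all over the working-day offsets
theorem per_employee (sd s : Int) (row : List Int) :
    ((PySem.List.pyRange 0 7 1).foldl (fun (st : Int × Bool) i =>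
      (st.1 + 1,
        if PySem.Int.mod st.1 7 = 6 ∨ PySem.Int.mod st.1 7 = 0 then st.2
        else if timeToNum s + 10 < timeToNum (PySem.List.pyGetD row i 0) then false
        else st.2)) (sd, true)).2
    = ((PySem.List.pyRange 0 7 1).filter (fun i =>
        ¬ (PySem.Int.mod (sd + i) 7 = 0 ∨ PySem.Int.mod (sd + i) 7 = 6))).all
        (fun i => timeToNum (PySem.List.pyGetD row i 0) ≤ timeToNum s + 10) := by
  rw [fold_inv, List.all_filter]
  simp only [tn7, loop2, List.all_cons, List.all_nil, Bool.true_and, Bool.and_true, add_zero]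
  rw [show sd+1+1 = sd+2 by ring, show sd+2+1 = sd+3 by ring, show sd+3+1 = sd+4 by ring,
      show sd+4+1 = sd+5 by ring, show sd+5+1 = sd+6 by ring]
  simp only [atom_eq]

-- A's outer loop is a count, i.e. the length of a filtered index range
theorem count_fold (q : Int → Bool) : ∀ (L : List Int) (acc : Int),
    L.foldl (fun ans idx => if q idx = true then ans + 1 else ans) acc
      = acc + ((L.filter q).length : Int) := by
  intro L
  induction L with
  | nil => intro acc; simp
  | cons x t ih =>
    intro acc
    by_cases hx : q x = true <;> simp [List.foldl_cons, hx, ih] <;> omega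

-- B's day-major sweep of successive filters is one filter by the conjunction over working days
theorem day_fold (sd : Int) (p : Int → Int → Bool) : ∀ (L : List Int) (al : List Int),
    L.foldl (fun al i =>
      if PySem.Int.mod (sd + i) 7 = 0 ∨ PySem.Int.mod (sd + i) 7 = 6 then al
      else al.filter (p i)) al
    = al.filter (fun j =>
        (L.filter (fun i => ¬ (PySem.Int.mod (sd + i) 7 = 0 ∨ PySem.Int.mod (sd + i) 7 = 6))).all
          (fun i => p i j)) := by
  intro L
  induction L with
  | nil => intro al; simp
  | cons i t ih =>
    intro al
    simp only [List.foldl_cons, List.filter_cons, decide_eq_true_eq]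
    by_cases hW : PySem.Int.mod (sd + i) 7 = 0 ∨ PySem.Int.mod (sd + i) 7 = 6
    · rw [if_pos hW, if_neg (not_not_intro hW), ih]
    · rw [if_neg hW, if_pos hW, ih, List.filter_filter]
      refine List.filter_congr (fun j _ => ?_)
      simp [Bool.and_comm]

-- ===== VERDICT (by name: the statement is the Claim_ definition above) =====
theorem solution_spec : Claim_equal_solution := by
  intro sch tl sd _ _
  show solution sch tl sd = solution_alt sch tl sd
  simp only [solution, solution_alt, per_employee]
  rw [count_fold, day_fold, zero_add]
  congr 2
  apply List.filter_congr
  intro j hj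
  obtain ⟨h0, h1⟩ := PySem.List.mem_pyRange_one.mp hj
  have hlim : PySem.List.pyGetD (sch.map (fun s => timeToNum s + 10)) j 0
      = timeToNum (PySem.List.pyGetD sch j 0) + 10 := by
    rw [PySem.List.pyGetD_eq_getElem _ 0 h0 (by simpa using h1),
        PySem.List.pyGetD_eq_getElem _ 0 h0 h1, List.getElem_map]
  simp only [hlim]
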